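-- pv_equiv track=rewrite | github.com/jamjamzo/jamjamzo_BaekJoon | 백준/Bronze/2153. 소수 단어/소수 단어.py | TextNumber
-- ===== SOURCE A (Python) =====
-- def TextNumber(text):
--   alpha = [' ']
--   for i in range(97,123):
--     alpha.append(chr(i))
--   for i in range(65,91):
--     alpha.append(chr(i))
--   n = 0
--   for i in range(len(text)):
--     a = alpha.index(text[i])
--     n += a
--   return n
-- ===== SOURCE B (Python) =====
-- def TextNumber(text):
--   counts = {}
--   for c in text:
--     counts[c] = counts.get(c, 0) + 1
--   total = 0
--   for c, k in counts.items():
--     if c == ' ':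
--       v = 0
--     elif 'a' <= c <= 'z':
--       v = ord(c) - 96
--     elif 'A' <= c <= 'Z':
--       v = ord(c) - 38
--     else:
--       raise ValueError(f"{c!r} is not in list")
--     total += k * v
--   return total
-- ===== Notes on version B (the rewrite author's own statement) =====
-- stated objective: alternative
-- what changed: Replaces A's per-character list.index scan over a built 53-entry alphabet list with a two-stage frequency-aggregation: first pass builds a char->count dict, then the result is summed as count*value over the distinct characters only; both raise ValueError on out-of-set characters, which Pre_ excludes.
import Mathlib
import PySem

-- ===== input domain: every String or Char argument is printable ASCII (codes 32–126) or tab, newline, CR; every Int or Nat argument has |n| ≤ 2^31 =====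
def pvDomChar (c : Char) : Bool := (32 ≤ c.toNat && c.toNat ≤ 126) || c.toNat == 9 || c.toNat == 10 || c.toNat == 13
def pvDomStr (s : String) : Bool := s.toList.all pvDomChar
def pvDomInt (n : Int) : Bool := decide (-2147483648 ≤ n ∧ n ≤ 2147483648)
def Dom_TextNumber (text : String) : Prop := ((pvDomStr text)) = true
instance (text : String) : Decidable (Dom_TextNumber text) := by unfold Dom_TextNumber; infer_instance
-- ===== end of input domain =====

-- B replaces A's per-character linear scan of a built 53-entry alphabet list by a
-- two-stage frequency aggregation: a char->count dict, then sum of count*value over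
-- the distinct characters (alternative algorithm; return values only).

-- ===== PORT A =====
-- alpha = [' ']; for i in range(97,123): alpha.append(chr(i)); for i in range(65,91): alpha.append(chr(i))
def pvAlpha : List Char :=
  let a := (PySem.List.pyRange 97 123 1).foldl (fun acc i => acc ++ [Char.ofNat i.toNat]) [' ']
  (PySem.List.pyRange 65 91 1).foldl (fun acc i => acc ++ [Char.ofNat i.toNat]) a

def TextNumber (text : String) : Int :=
  -- for i in range(len(text)): n += alpha.index(text[i])
  -- alpha.index raises ValueError when the char is absent (index? = none); Pre_ excludes that.
  (PySem.List.pyRange 0 (PySem.Str.len text) 1).foldl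
    (fun n i =>
      n + (((PySem.List.index? pvAlpha (PySem.List.pyGetD text.toList i ' ')).getD 0 : Nat) : Int))
    0

-- ===== PORT B =====
-- the per-distinct-character value v computed inside B's second loop
def pvVal (c : Char) : Int :=
  if c = ' ' then 0
  else if 'a' ≤ c ∧ c ≤ 'z' then (c.toNat : Int) - 96
  else if 'A' ≤ c ∧ c ≤ 'Z' then (c.toNat : Int) - 38
  else 0  -- B raises ValueError here, like A; excluded by Pre_

def TextNumber_alt (text : String) : Int :=
  -- counts = {}; for c in text: counts[c] = counts.get(c, 0) + 1
  let counts : PySem.Dict Char Int :=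
    text.toList.foldl (fun d c => d.insert c (d.getD c 0 + 1)) PySem.Dict.empty
  -- total = 0; for c, k in counts.items(): total += k * v
  counts.items.foldl (fun total p => total + p.2 * pvVal p.1) 0

-- ===== PRECONDITION & SPEC =====
-- Pre_ excludes exactly the inputs on which both Pythons raise ValueError:
-- a character that is neither a space nor an ASCII letter.
def Pre_TextNumber (text : String) : Prop :=
  (text.toList.all fun c => c == ' ' || (97 ≤ c.toNat && c.toNat ≤ 122) || (65 ≤ c.toNat && c.toNat ≤ 90)) = true
instance (text : String) : Decidable (Pre_TextNumber text) := by unfold Pre_TextNumber; infer_instance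

def pvWitness_TextNumber : String := "Ab z"

def Spec_TextNumber (text : String) (out : Int) : Prop := out = TextNumber_alt text
instance (text : String) (out : Int) : Decidable (Spec_TextNumber text out) := by unfold Spec_TextNumber; infer_instance

-- ===== CLAIM (what is proved, stated in full; the proofs are below) =====
def Claim_equal_TextNumber : Prop := ∀ (text : String), Dom_TextNumber text → Pre_TextNumber text → Spec_TextNumber text (TextNumber text)

-- ===== LEMMAS AND PROOFS =====

-- checked over all relevant codepoints at once
set_option maxRecDepth 8000 in
theorem pvIndex_val_nat : ∀ n : Nat, n < 128 →
    (Char.ofNat n = ' ' ∨ (97 ≤ n ∧ n ≤ 122) ∨ (65 ≤ n ∧ n ≤ 90)) →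
    (((PySem.List.index? pvAlpha (Char.ofNat n)).getD 0 : Nat) : Int) = pvVal (Char.ofNat n) := by
  decide

theorem pvIndex_val (c : Char)
    (h : c = ' ' ∨ (97 ≤ c.toNat ∧ c.toNat ≤ 122) ∨ (65 ≤ c.toNat ∧ c.toNat ≤ 90)) :
    (((PySem.List.index? pvAlpha c).getD 0 : Nat) : Int) = pvVal c := by
  have hlt : c.toNat < 128 := by
    rcases h with h | ⟨_, h2⟩ | ⟨_, h2⟩
    · subst h; decide
    · omega
    · omega
  have hmain := pvIndex_val_nat c.toNat hlt
  rw [Char.ofNat_toNat] at hmain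
  exact hmain h

-- sum of an indicator at x over a duplicate-free list containing x
theorem pvSum_indicator (f : Char → Int) (x : Char) :
    ∀ (s : List Char), s.Nodup → x ∈ s →
      (s.map (fun k => if k = x then f k else 0)).sum = f x := by
  intro s
  induction s with
  | nil => intro _ hx; cases hx
  | cons a t ih =>
    intro hnd hx
    rcases List.nodup_cons.mp hnd with ⟨ha, hndt⟩
    by_cases hax : a = x
    · subst hax
      have : (t.map (fun k => if k = a then f k else 0)).sum = 0 := by
        rw [List.sum_eq_zero]
        intro y hy
        rcases List.mem_map.mp hy with ⟨k, hk, rfl⟩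
        have : k ≠ a := fun h => ha (h ▸ hk)
        simp [this]
      simp [this]
    · have hxt : x ∈ t := by
        rcases List.mem_cons.mp hx with h | h
        · exact absurd h.symm hax
        · exact h
      simp [hax, ih hndt hxt]

-- the grouped sum over the distinct characters equals the plain sum over the text
theorem pvCount_sum (f : Char → Int) (s : List Char) (hs : s.Nodup) :
    ∀ (xs : List Char), (∀ x ∈ xs, x ∈ s) →
      (s.map (fun k => ((xs.count k : Nat) : Int) * f k)).sum = (xs.map f).sum := by
  intro xs
  induction xs with
  | nil => intro _; simp
  | cons x t ih =>
    intro hsub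
    have hstep : (s.map (fun k => ((((x :: t).count k : Nat)) : Int) * f k))
        = s.map (fun k => ((t.count k : Nat) : Int) * f k + (if k = x then f k else 0)) := by
      apply List.map_congr_left
      intro k _
      have hcnt : (x :: t).count k = t.count k + (if k = x then 1 else 0) := by
        by_cases hkx : k = x
        · subst hkx; simp
        · have hxk : x ≠ k := fun h => hkx h.symm
          simp [hkx, hxk]
      rw [hcnt]
      push_cast
      by_cases hkx : k = x <;> simp [hkx] <;> ring
    rw [hstep, PySem.List.sum_map_add_int,
        ih (fun y hy => hsub y (List.mem_cons_of_mem _ hy)),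
        pvSum_indicator f x s hs (hsub x List.mem_cons_self)]
    rw [List.map_cons, List.sum_cons]
    ring

-- ===== VERDICT (by name: the statement is the Claim_ definition above) =====
theorem TextNumber_spec : Claim_equal_TextNumber := by
  intro text _ hpre
  unfold Spec_TextNumber TextNumber TextNumber_alt
  -- A's side: the index loop is the plain sum of pvVal over the characters
  rw [show PySem.Str.len text = (text.toList.length : Int) from PySem.Str.len_eq text]
  rw [PySem.List.foldl_pyRange_zero_pyGetD' text.toList ' '
        (fun n c => n + (((PySem.List.index? pvAlpha c).getD 0 : Nat) : Int)) 0]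
  rw [PySem.List.foldl_congr_mem text.toList
        (fun n c => n + (((PySem.List.index? pvAlpha c).getD 0 : Nat) : Int))
        (fun n c => n + pvVal c) 0
        (fun acc x hx => by
          have hb := List.all_eq_true.mp hpre x hx
          simp only [Bool.or_eq_true, Bool.and_eq_true, beq_iff_eq, decide_eq_true_eq] at hb
          show acc + _ = acc + _
          rw [pvIndex_val x (by tauto)])]
  rw [PySem.List.foldl_add]
  -- B's side: the counting loop is Counter, its items are (k, count k) over the distinct chars
  rw [PySem.Dict.foldl_insert_getD_add_one_eq_counter]
  rw [PySem.List.foldl_add (g := fun p : Char × Int => p.2 * pvVal p.1)]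
  rw [PySem.Dict.items_counter, List.map_map]
  have : ((PySem.Set.ofList text.toList).map
      ((fun p : Char × Int => p.2 * pvVal p.1) ∘ fun k => (k, (text.toList.count k : Int))))
      = (PySem.Set.ofList text.toList).map (fun k => ((text.toList.count k : Nat) : Int) * pvVal k) := by
    apply List.map_congr_left; intro k _; simp
  rw [this, pvCount_sum pvVal (PySem.Set.ofList text.toList)
        (PySem.Set.nodup_ofList text.toList) text.toList
        (fun x hx => (PySem.Set.mem_ofList text.toList x).mpr hx)]
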